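-- pv_equiv track=rewrite | github.com/GrgurDuj/nono_game | utils.py | determine_hints
-- ===== SOURCE A (Python) =====
-- from typing import List, Tuple
--
-- def determine_hints(solution: List[List[int]]) -> Tuple[List[List[int]], List[List[int]]]:
--     """
--     Determines the hints for each row and column in the Nonogram grid based on the solution.
--
--     Args:
--         solution (List[List[int]]): The solution grid for the Nonogram puzzle.
--
--     Returns:
--         Tuple[List[List[int]], List[List[int]]]: A tuple containing the column hints and row hints respectively.
--     """
--
--     row_hints = []
--     column_hints = []
--     # Determine column hints
--     for col in range(len(solution[0])):
--         col_hint = []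
--         count = 0
--         for row in range(len(solution)):
--             if solution[row][col] == 1:
--                 count += 1
--             elif count > 0:
--                 col_hint.append(count)
--                 count = 0
--         if count > 0:
--             col_hint.append(count)
--         column_hints.append(col_hint)
--
--     # Determine row hints
--     for row in solution:
--         row_hint = []
--         count = 0
--         for square in row:
--             if square == 1:
--                 count += 1
--             elif count > 0:
--                 row_hint.append(count)
--                 count = 0
--         if count > 0:
--             row_hint.append(count)
--         row_hints.append(row_hint)
--     return (column_hints, row_hints)
-- ===== SOURCE B (Python) =====
-- from typing import List, Tuple
--
--
-- def _hints(line: List[int]) -> List[int]: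
--     # Structural recursion building the hint list back-to-front: compute the
--     # hints of the tail, then either extend the tail's first run, start a new
--     # run of length 1, or pass the tail's hints through.
--     if not line:
--         return []
--     rest = _hints(line[1:])
--     if line[0] != 1:
--         return rest
--     if line[1:2] == [1]:
--         return [rest[0] + 1] + rest[1:]
--     return [1] + rest
--
--
-- def determine_hints(solution: List[List[int]]) -> Tuple[List[List[int]], List[List[int]]]:
--     columns = [[row[c] for row in solution] for c in range(len(solution[0]))]
--     return ([_hints(col) for col in columns], [_hints(row) for row in solution])
-- ===== Notes on version B (the rewrite author's own statement) =====
-- stated objective: alternative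
-- what changed: Replaces A's forward counter-accumulator loops by a structural recursion that builds each hint list back-to-front (extend the tail's first run, start a new run, or pass through), applied per row and per extracted column.
import Mathlib
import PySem

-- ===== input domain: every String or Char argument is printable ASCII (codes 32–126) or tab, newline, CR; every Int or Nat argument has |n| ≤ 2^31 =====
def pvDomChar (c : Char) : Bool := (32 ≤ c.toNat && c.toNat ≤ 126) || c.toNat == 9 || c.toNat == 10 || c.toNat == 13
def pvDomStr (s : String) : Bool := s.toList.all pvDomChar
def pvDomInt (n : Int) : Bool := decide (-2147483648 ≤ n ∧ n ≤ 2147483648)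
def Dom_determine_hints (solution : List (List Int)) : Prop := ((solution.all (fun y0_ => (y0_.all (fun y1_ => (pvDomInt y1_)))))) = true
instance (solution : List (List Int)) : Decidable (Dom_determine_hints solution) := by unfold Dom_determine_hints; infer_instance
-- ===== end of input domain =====

-- B replaces A's forward counter-accumulator loops by a structural recursion
-- building each hint list back-to-front (alternative decomposition, same cost).

-- ===== PORT A =====
-- A's inner counting loop, one step: state = (hint list so far, current run count)
def pvAstep (s : List Int × Int) (sq : Int) : List Int × Int :=
  if sq = 1 then (s.1, s.2 + 1)
  else if s.2 > 0 then (s.1 ++ [s.2], 0) else s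

-- finalize: trailing run
def pvAfin (s : List Int × Int) : List Int :=
  if s.2 > 0 then s.1 ++ [s.2] else s.1

-- A's row loop body
def pvAline (line : List Int) : List Int :=
  pvAfin (line.foldl pvAstep ([], 0))

def determine_hints (solution : List (List Int)) : List (List Int) × List (List Int) :=
  -- for col in range(len(solution[0])): inner loop over the rows, indexing solution[row][col]
  let column_hints := (PySem.List.pyRange 0 ((solution.headD []).length) 1).map (fun col =>
    pvAfin (solution.foldl (fun s row => pvAstep s ((PySem.List.pyGet? row col).getD 0)) ([], 0)))
  -- for row in solution: the same counting loop on the row itself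
  let row_hints := solution.map pvAline
  (column_hints, row_hints)

-- ===== PORT B =====
-- _hints: structural recursion; 'line[1:2] == [1]' is 't.take 1 = [1]';
-- 'rest[0]' is headD 0 (that branch is only reached when rest is nonempty).
def pvHintsRec : List Int → List Int
  | [] => []
  | x :: t =>
    let rest := pvHintsRec t
    if x ≠ 1 then rest
    else if t.take 1 = [1] then (rest.headD 0 + 1) :: rest.drop 1
    else 1 :: rest

def determine_hints_alt (solution : List (List Int)) : List (List Int) × List (List Int) :=
  let columns := (PySem.List.pyRange 0 ((solution.headD []).length) 1).map (fun c =>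
    solution.map (fun row => (PySem.List.pyGet? row c).getD 0))
  (columns.map pvHintsRec, solution.map pvHintsRec)

-- ===== PRECONDITION & SPEC =====
-- Pre_ excludes exactly the inputs where A (and B) raise IndexError: the empty
-- grid (solution[0]) and grids with a row shorter than row 0 (solution[row][col]).
def Pre_determine_hints (solution : List (List Int)) : Prop :=
  solution ≠ [] ∧ ∀ row ∈ solution, (solution.headD []).length ≤ row.length

instance (solution : List (List Int)) : Decidable (Pre_determine_hints solution) := by
  unfold Pre_determine_hints; infer_instance

def pvWitness_determine_hints : List (List Int) := [[1, 0], [0, 1]]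

def Spec_determine_hints (solution : List (List Int)) (out : List (List Int) × List (List Int)) : Prop := out = determine_hints_alt solution
instance (solution : List (List Int)) (out : List (List Int) × List (List Int)) : Decidable (Spec_determine_hints solution out) := by unfold Spec_determine_hints; infer_instance

-- ===== CLAIM (what is proved, stated in full; the proofs are below) =====
def Claim_equal_determine_hints : Prop := ∀ (solution : List (List Int)), Dom_determine_hints solution → Pre_determine_hints solution → Spec_determine_hints solution (determine_hints solution)

-- ===== LEMMAS AND PROOFS =====

-- what A's finalizer yields when the pending count is n ≥ 1, expressed on B's result
def pvBump (n : Int) (t : List Int) : List Int :=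
  if t.take 1 = [1] then
    match pvHintsRec t with
    | h :: hs => (h + n) :: hs
    | [] => [n]   -- unreachable: pvHintsRec of a list starting with 1 is nonempty
  else n :: pvHintsRec t

lemma pvHintsRec_one_cons (s : List Int) : ∃ h hs, pvHintsRec (1 :: s) = h :: hs := by
  unfold pvHintsRec
  split_ifs with h1 h2
  · exact absurd rfl h1
  · exact ⟨_, _, rfl⟩
  · exact ⟨_, _, rfl⟩

lemma pvHintsRec_cons_ne (x : Int) (t : List Int) (hx : x ≠ 1) :
    pvHintsRec (x :: t) = pvHintsRec t := by
  conv_lhs => rw [pvHintsRec.eq_def]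
  simp [hx]

lemma pvHintsRec_cons_one (t : List Int) : pvHintsRec (1 :: t) = pvBump 1 t := by
  unfold pvHintsRec pvBump
  rw [if_neg (by simp)]
  by_cases h1 : t.take 1 = [1]
  · rw [if_pos h1, if_pos h1]
    cases t with
    | nil => simp at h1
    | cons y s =>
      simp only [List.take, List.cons.injEq] at h1
      obtain ⟨rfl, -⟩ := h1
      obtain ⟨h, hs, heq⟩ := pvHintsRec_one_cons s
      simp [heq]
  · rw [if_neg h1, if_neg h1]

lemma pvBump_cons_one (n : Int) (t : List Int) : pvBump n (1 :: t) = pvBump (n + 1) t := by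
  conv_lhs => rw [pvBump]
  rw [if_pos (by simp), pvHintsRec_cons_one, pvBump]
  by_cases h1 : t.take 1 = [1]
  · rw [if_pos h1]
    cases t with
    | nil => simp at h1
    | cons y s =>
      simp only [List.take, List.cons.injEq] at h1
      obtain ⟨rfl, -⟩ := h1
      obtain ⟨h, hs, heq⟩ := pvHintsRec_one_cons s
      rw [pvBump, if_pos (by simp), heq]
      show (h + 1 + n) :: hs = (h + (n + 1)) :: hs
      congr 1
      ring
  · rw [if_neg h1, pvBump, if_neg h1]
    show (1 + n) :: pvHintsRec t = (n + 1) :: pvHintsRec t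
    congr 1
    ring

lemma pvBump_cons_ne (n x : Int) (t : List Int) (hx : x ≠ 1) :
    pvBump n (x :: t) = n :: pvHintsRec t := by
  rw [pvBump, if_neg (by simp [hx]), pvHintsRec_cons_ne x t hx]

lemma pv_main (t : List Int) : ∀ hs : List Int,
    (pvAfin (t.foldl pvAstep (hs, 0)) = hs ++ pvHintsRec t) ∧
    (∀ n : Int, 1 ≤ n → pvAfin (t.foldl pvAstep (hs, n)) = hs ++ pvBump n t) := by
  induction t with
  | nil =>
    intro hs
    constructor
    · simp [pvAfin, pvHintsRec]
    · intro n hn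
      have h0 : (0:Int) < n := hn
      simp only [List.foldl_nil, pvAfin, pvBump, pvHintsRec]
      simp [h0]
  | cons x t ih =>
    intro hs
    constructor
    · by_cases hx : x = 1
      · subst hx
        have hst : pvAstep (hs, 0) 1 = (hs, 1) := by simp [pvAstep]
        rw [List.foldl_cons, hst, (ih hs).2 1 (by omega), pvHintsRec_cons_one]
      · have hst : pvAstep (hs, 0) x = (hs, 0) := by simp [pvAstep, hx]
        rw [List.foldl_cons, hst, (ih hs).1, pvHintsRec_cons_ne x t hx]
    · intro n hn
      by_cases hx : x = 1
      · subst hx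
        have hst : pvAstep (hs, n) 1 = (hs, n + 1) := by simp [pvAstep]
        rw [List.foldl_cons, hst, (ih hs).2 (n + 1) (by omega), pvBump_cons_one]
      · have hst : pvAstep (hs, n) x = (hs ++ [n], 0) := by
          have h0 : (0:Int) < n := hn
          simp [pvAstep, hx, h0]
        rw [List.foldl_cons, hst, (ih (hs ++ [n])).1, List.append_assoc,
          pvBump_cons_ne n x t hx]
        rfl

-- per-line: A's counting loop equals B's structural recursion
lemma pvAline_eq (line : List Int) : pvAline line = pvHintsRec line := by
  simpa [pvAline] using (pv_main line []).1

lemma column_eq (solution : List (List Int)) (col : Int) :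
    pvAfin (solution.foldl (fun s row => pvAstep s ((PySem.List.pyGet? row col).getD 0)) ([], 0)) =
    pvHintsRec (solution.map (fun row => (PySem.List.pyGet? row col).getD 0)) := by
  rw [← pvAline_eq, pvAline, List.foldl_map]

-- ===== VERDICT (by name: the statement is the Claim_ definition above) =====
theorem determine_hints_spec : Claim_equal_determine_hints := by
  intro solution _ _
  unfold Spec_determine_hints determine_hints determine_hints_alt
  refine Prod.ext ?_ ?_
  · simp only [List.map_map]
    exact List.map_congr_left (fun col _ => column_eq solution col)
  · exact List.map_congr_left (fun row _ => pvAline_eq row)
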